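-- pv_equiv track=rewrite | github.com/theimpostor/bun-doc-skill | skills/bun-docs/scripts/refresh_references.py | find_page_starts
-- ===== SOURCE A (Python) =====
-- def find_page_starts(lines: list[str]) -> list[int]:
--     starts: list[int] = []
--     for index, line in enumerate(lines):
--         if not line.startswith("# "):
--             continue
--         probe = index + 1
--         while probe < len(lines) and not lines[probe].strip():
--             probe += 1
--         if probe < len(lines) and lines[probe].startswith("Source: "):
--             starts.append(index)
--     return starts
-- ===== SOURCE B (Python) =====
-- def find_page_starts(lines: list[str]) -> list[int]:
--     n = len(lines)
--     # nb[i] = index of the first non-blank line at or after i (n if none); one backward pass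
--     nb = [n] * (n + 1)
--     for i in range(n - 1, -1, -1):
--         nb[i] = i if lines[i].strip() else nb[i + 1]
--     starts: list[int] = []
--     for index, line in enumerate(lines):
--         if line.startswith("# "):
--             probe = nb[index + 1]
--             if probe < n and lines[probe].startswith("Source: "):
--                 starts.append(index)
--     return starts
-- ===== Notes on version B (the rewrite author's own statement) =====
-- stated objective: alternative
-- what changed: Replaces the inner blank-skipping while-loop with a next-non-blank-line table precomputed in one backward pass, consulted by a flat forward scan.
import Mathlib
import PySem

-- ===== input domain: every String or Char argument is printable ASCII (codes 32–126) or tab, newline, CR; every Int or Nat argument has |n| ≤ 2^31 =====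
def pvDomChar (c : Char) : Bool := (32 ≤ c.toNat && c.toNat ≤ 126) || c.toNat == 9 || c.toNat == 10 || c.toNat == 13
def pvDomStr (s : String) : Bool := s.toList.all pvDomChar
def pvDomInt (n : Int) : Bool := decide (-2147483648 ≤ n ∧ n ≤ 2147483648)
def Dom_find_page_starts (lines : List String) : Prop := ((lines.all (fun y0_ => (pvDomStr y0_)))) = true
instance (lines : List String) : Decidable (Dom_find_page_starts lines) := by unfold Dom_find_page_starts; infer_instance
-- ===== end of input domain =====

-- B replaces A's inner blank-skipping while-loop by a next-non-blank table built in one backward pass (alternative decomposition, same result).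


-- ===== PORT A =====
-- the inner 'while probe < len(lines) and not lines[probe].strip(): probe += 1'
def probeA (lines : List String) (probe : Nat) : Nat :=
  if h : probe < lines.length ∧ PySem.Str.strip (lines.getD probe "") = "" then
    probeA lines (probe + 1)
  else probe
termination_by lines.length - probe
decreasing_by omega

def find_page_starts (lines : List String) : List Int :=
  (PySem.List.enumerate lines).foldl (fun starts p =>
    if ¬ PySem.Str.startswith p.2 "# " then starts
    else
      let probe := probeA lines (p.1.toNat + 1)
      if probe < lines.length ∧ PySem.Str.startswith (lines.getD probe "") "Source: " then
        starts ++ [p.1]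
      else starts) []

-- ===== PORT B =====
-- nb table: entry i = first index ≥ i with a non-blank line (length if none); built backward
def buildNb (lines : List String) (i : Nat) : List Nat :=
  match lines with
  | [] => [i]
  | x :: xs =>
      let rest := buildNb xs (i + 1)
      (if PySem.Str.strip x = "" then rest.headD (i + 1) else i) :: rest

def find_page_starts_alt (lines : List String) : List Int :=
  let n := lines.length
  let nb := buildNb lines 0
  (PySem.List.enumerate lines).foldl (fun starts p =>
    if PySem.Str.startswith p.2 "# " then
      let probe := nb.getD (p.1.toNat + 1) n
      if probe < n ∧ PySem.Str.startswith (lines.getD probe "") "Source: " then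
        starts ++ [p.1]
      else starts
    else starts) []

-- ===== PRECONDITION & SPEC =====
def Spec_find_page_starts (lines : List String) (out : List Int) : Prop := out = find_page_starts_alt lines
instance (lines : List String) (out : List Int) : Decidable (Spec_find_page_starts lines out) := by unfold Spec_find_page_starts; infer_instance

-- ===== CLAIM (what is proved, stated in full; the proofs are below) =====
def Claim_equal_find_page_starts : Prop := ∀ (lines : List String), Dom_find_page_starts lines → Spec_find_page_starts lines (find_page_starts lines)

-- ===== LEMMAS AND PROOFS =====
-- the value A's while-loop computes, expressed structurally on the suffix
def probeS : List String → Nat → Nat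
  | [], i => i
  | x :: xs, i => if PySem.Str.strip x = "" then probeS xs (i + 1) else i

lemma buildNb_headD : ∀ (xs : List String) (i d : Nat), (buildNb xs i).headD d = probeS xs i := by
  intro xs
  induction xs with
  | nil => intro i d; simp [buildNb, probeS]
  | cons x xs ih =>
      intro i d
      simp only [buildNb, probeS, List.headD_cons]
      split
      · exact ih (i + 1) (i + 1)
      · rfl

lemma buildNb_getD : ∀ (k : Nat) (xs : List String) (i d : Nat), k ≤ xs.length →
    (buildNb xs i).getD k d = (buildNb (xs.drop k) (i + k)).headD d := by
  intro k
  induction k with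
  | zero => intro xs i d _; cases xs <;> simp [buildNb, List.getD]
  | succ k ih =>
      intro xs i d hk
      cases xs with
      | nil => simp at hk
      | cons x xs =>
          simp only [buildNb, List.drop_succ_cons]
          have : (i + 1) + k = i + (k + 1) := by omega
          rw [List.getD_cons_succ, ih xs (i + 1) d (by simpa using hk), this]

lemma probeA_eq_probeS (xs : List String) : ∀ (n j : Nat), xs.length - j ≤ n →
    probeA xs j = probeS (xs.drop j) j := by
  intro n
  induction n with
  | zero =>
      intro j hj
      have hge : xs.length ≤ j := by omega
      rw [probeA, List.drop_eq_nil_of_le hge]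
      simp only [probeS]
      rw [dif_neg (by omega)]
  | succ n ih =>
      intro j hj
      rw [probeA]
      by_cases hlt : j < xs.length
      · have hdrop : xs.drop j = xs[j] :: xs.drop (j + 1) :=
          List.drop_eq_getElem_cons hlt
        have hget : xs.getD j "" = xs[j] := List.getD_eq_getElem xs "" hlt
        by_cases hb : PySem.Str.strip (xs.getD j "") = ""
        · rw [dif_pos ⟨hlt, hb⟩, ih (j + 1) (by omega), hdrop]
          simp only [probeS]
          rw [if_pos (hget ▸ hb)]
        · rw [dif_neg (by tauto), hdrop]
          simp only [probeS]
          rw [if_neg (hget ▸ hb)]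
      · rw [dif_neg (by tauto), List.drop_eq_nil_of_le (by omega)]
        simp [probeS]

lemma probeA_eq_nb (xs : List String) (k : Nat) (hk : k + 1 ≤ xs.length) :
    (buildNb xs 0).getD (k + 1) xs.length = probeA xs (k + 1) := by
  rw [buildNb_getD (k + 1) xs 0 xs.length hk, buildNb_headD,
      probeA_eq_probeS xs (xs.length) (k + 1) (by omega)]
  simp

-- ===== VERDICT (by name: the statement is the Claim_ definition above) =====
theorem find_page_starts_spec : Claim_equal_find_page_starts := by
  intro lines _
  unfold Spec_find_page_starts find_page_starts find_page_starts_alt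
  apply PySem.List.foldl_congr_mem
  intro acc p hp
  rcases (PySem.List.mem_enumerate_iff lines 0 p).1 hp with ⟨k, hk, rfl⟩
  have htn : ((0 : Int) + k).toNat = k := by omega
  have hnb := probeA_eq_nb lines k hk
  simp only [htn, hnb, PySem.Str.startswith_eq]
  by_cases hs : PySem.Chars.startswith lines[k].toList ['#', ' '] = true
  · simp [hs]
  · simp [hs]
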